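-- pv_equiv track=rewrite | github.com/Benzoin96485/Enerzymette | enerzymette/mep_util.py | _find_rate_determining_step
-- ===== SOURCE A (Python) =====
-- from typing import List, Tuple
--
-- def _find_rate_determining_step(intermediate_indices, energies, ci_index) -> Tuple[int, int, int]:
--     new_reactant_index = 0
--     new_product_index = len(energies) - 1
--     for intermediate_index in sorted(intermediate_indices):
--         if intermediate_index < ci_index:
--             new_reactant_index = intermediate_index
--         elif intermediate_index > ci_index:
--             new_product_index = intermediate_index
--             break
--     return new_reactant_index, new_product_index
-- ===== SOURCE B (Python) =====
-- def _find_rate_determining_step(intermediate_indices, energies, ci_index):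
--     lo = None  # max intermediate index strictly below ci_index
--     hi = None  # min intermediate index strictly above ci_index
--     for x in intermediate_indices:
--         if x < ci_index and (lo is None or x > lo):
--             lo = x
--         elif x > ci_index and (hi is None or x < hi):
--             hi = x
--     return (0 if lo is None else lo,
--             len(energies) - 1 if hi is None else hi)
-- ===== Notes on version B (the rewrite author's own statement) =====
-- stated objective: alternative
-- what changed: Replaced sort-then-scan-with-break by a single unsorted pass that tracks the maximum index below ci_index and the minimum index above it; no sorting at all, but Python's C-level sort means no measured speed-up.
import Mathlib
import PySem

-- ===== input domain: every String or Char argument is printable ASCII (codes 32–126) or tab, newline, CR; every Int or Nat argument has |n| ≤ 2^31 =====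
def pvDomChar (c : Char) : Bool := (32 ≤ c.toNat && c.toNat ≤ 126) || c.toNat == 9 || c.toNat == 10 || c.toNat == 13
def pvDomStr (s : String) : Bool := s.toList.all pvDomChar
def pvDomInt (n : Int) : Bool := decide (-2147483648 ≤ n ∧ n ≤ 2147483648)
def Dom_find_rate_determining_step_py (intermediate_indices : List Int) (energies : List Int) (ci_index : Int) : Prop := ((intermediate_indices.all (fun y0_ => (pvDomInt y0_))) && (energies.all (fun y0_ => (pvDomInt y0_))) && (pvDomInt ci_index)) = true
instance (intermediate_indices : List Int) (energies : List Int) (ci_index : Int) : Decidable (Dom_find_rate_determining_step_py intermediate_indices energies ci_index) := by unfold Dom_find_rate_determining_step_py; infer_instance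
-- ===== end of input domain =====

-- B replaces A's sort + early-exit scan by one unsorted pass tracking the max index below
-- and the min index above ci_index (objective: alternative; no sorting needed).

-- ===== PORT A =====
-- the for-loop over sorted(intermediate_indices), with `break` as an early return
def aLoop (ci : Int) (r p : Int) : List Int → Int × Int
  | [] => (r, p)
  | x :: xs =>
    if x < ci then aLoop ci x p xs
    else if x > ci then (r, x)
    else aLoop ci r p xs

def find_rate_determining_step_py (intermediate_indices : List Int) (energies : List Int) (ci_index : Int) : Int × Int :=
  aLoop ci_index 0 ((energies.length : Int) - 1) (PySem.List.sorted intermediate_indices (fun x => x) false)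

-- ===== PORT B =====
-- one step of B's single pass: `if x < ci and (lo is None or x > lo): lo = x elif x > ci and (hi is None or x < hi): hi = x`
def bStep (ci : Int) (s : Option Int × Option Int) (x : Int) : Option Int × Option Int :=
  if decide (x < ci) && s.1.elim true (fun y => decide (x > y)) then (some x, s.2)
  else if decide (x > ci) && s.2.elim true (fun y => decide (x < y)) then (s.1, some x)
  else s

def find_rate_determining_step_py_alt (intermediate_indices : List Int) (energies : List Int) (ci_index : Int) : Int × Int :=
  let s := intermediate_indices.foldl (bStep ci_index) (none, none)
  (s.1.getD 0, s.2.getD ((energies.length : Int) - 1))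

-- ===== PRECONDITION & SPEC =====
def Spec_find_rate_determining_step_py (intermediate_indices : List Int) (energies : List Int) (ci_index : Int) (out : Int × Int) : Prop := out = find_rate_determining_step_py_alt intermediate_indices energies ci_index
instance (intermediate_indices : List Int) (energies : List Int) (ci_index : Int) (out : Int × Int) : Decidable (Spec_find_rate_determining_step_py intermediate_indices energies ci_index out) := by unfold Spec_find_rate_determining_step_py; infer_instance

-- ===== CLAIM (what is proved, stated in full; the proofs are below) =====
def Claim_equal_find_rate_determining_step_py : Prop := ∀ (intermediate_indices : List Int) (energies : List Int) (ci_index : Int), Dom_find_rate_determining_step_py intermediate_indices energies ci_index → Spec_find_rate_determining_step_py intermediate_indices energies ci_index (find_rate_determining_step_py intermediate_indices energies ci_index)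

-- ===== LEMMAS AND PROOFS =====

-- the best (w.r.t. combiner c) element of l satisfying p, if any
def best (p : Int → Bool) (c : Int → Int → Int) : List Int → Option Int
  | [] => none
  | x :: xs =>
    let m := best p c xs
    if p x then some (m.elim x (c x)) else m

theorem best_mem {p : Int → Bool} {c : Int → Int → Int}
    (hc : ∀ a b, c a b = a ∨ c a b = b) :
    ∀ {l : List Int} {m : Int}, best p c l = some m → m ∈ l ∧ p m = true := by
  intro l
  induction l with
  | nil => intro m h; simp [best] at h
  | cons x xs ih =>
    intro m h
    simp only [best] at h
    by_cases hx : p x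
    · simp [hx] at h
      cases hbx : best p c xs with
      | none => simp [hbx] at h; subst h; exact ⟨List.mem_cons_self, hx⟩
      | some m' =>
        simp [hbx] at h
        rcases hc x m' with h1 | h1
        · rw [h1] at h; subst h; exact ⟨List.mem_cons_self, hx⟩
        · rw [h1] at h; subst h
          obtain ⟨hm, hp⟩ := ih hbx
          exact ⟨List.mem_cons_of_mem _ hm, hp⟩
    · simp [hx] at h
      obtain ⟨hm, hp⟩ := ih h
      exact ⟨List.mem_cons_of_mem _ hm, hp⟩

theorem best_perm {p : Int → Bool} {c : Int → Int → Int}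
    (hcomm : ∀ a b, c a b = c b a) (hassoc : ∀ a b d, c a (c b d) = c (c a b) d) :
    ∀ {l l' : List Int}, l.Perm l' → best p c l = best p c l' := by
  intro l l' h
  induction h with
  | nil => rfl
  | cons x h ih => simp [best, ih]
  | swap x y l =>
    simp only [best]
    by_cases hx : p x <;> by_cases hy : p y <;>
      cases hb : best p c l <;>
      simp [hx, hy]
    · exact hcomm y x
    · rename_i m
      rw [hassoc, hassoc, hcomm x y]
  | trans h1 h2 ih1 ih2 => exact ih1.trans ih2

theorem best_none {p : Int → Bool} {c : Int → Int → Int} :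
    ∀ {l : List Int}, (∀ y ∈ l, p y = false) → best p c l = none := by
  intro l
  induction l with
  | nil => intro _; rfl
  | cons x xs ih =>
    intro h
    simp [best, h x List.mem_cons_self, ih (fun y hy => h y (List.mem_cons_of_mem _ hy))]

theorem max_cases' (a b : Int) : max a b = a ∨ max a b = b := by
  rcases le_total a b with h | h
  · right; exact max_eq_right h
  · left; exact max_eq_left h

theorem min_cases' (a b : Int) : min a b = a ∨ min a b = b := by
  rcases le_total a b with h | h
  · left; exact min_eq_left h
  · right; exact min_eq_right h

-- A's loop over a sorted list computes (max below, min above) with the given defaults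
theorem aLoop_eq (ci : Int) :
    ∀ (s : List Int), s.Pairwise (· ≤ ·) → ∀ (r p : Int),
    aLoop ci r p s =
      ((best (fun x => decide (x < ci)) max s).getD r,
       (best (fun x => decide (ci < x)) min s).getD p) := by
  intro s
  induction s with
  | nil => intro _ r p; rfl
  | cons x xs ih =>
    intro hpw r p
    have hle : ∀ y ∈ xs, x ≤ y := fun y hy => (List.pairwise_cons.mp hpw).1 y hy
    have htail := (List.pairwise_cons.mp hpw).2
    by_cases h1 : x < ci
    · have h2 : ¬ ci < x := by omega
      rw [show aLoop ci r p (x :: xs) = aLoop ci x p xs from by simp [aLoop, h1]]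
      rw [ih htail x p]
      simp only [best, h1, h2, decide_true, decide_false]
      cases hb : best (fun x => decide (x < ci)) max xs with
      | none => simp
      | some m =>
        have hm := (best_mem max_cases' hb).1
        simp [max_eq_right (hle m hm)]
    · by_cases h2 : ci < x
      · rw [show aLoop ci r p (x :: xs) = (r, x) from by simp [aLoop, h1, h2]]
        have hnone : best (fun x => decide (x < ci)) max (x :: xs) = none := by
          apply best_none
          intro y hy
          rcases List.mem_cons.mp hy with h | h
          · subst h; simp; omega
          · have := hle y h; simp; omega
        rw [hnone]
        simp only [best, h2, decide_true]
        cases hb : best (fun x => decide (ci < x)) min xs with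
        | none => simp
        | some m =>
          have hm := (best_mem min_cases' hb).1
          simp [min_eq_left (hle m hm)]
      · rw [show aLoop ci r p (x :: xs) = aLoop ci r p xs from by simp [aLoop, h1, h2]]
        rw [ih htail r p]
        simp [best, h1, h2]

-- B's joint step splits into two independent component steps
def stepL (ci : Int) (o : Option Int) (x : Int) : Option Int :=
  if x < ci then some (o.elim x (fun y => max y x)) else o

def stepR (ci : Int) (o : Option Int) (x : Int) : Option Int :=
  if ci < x then some (o.elim x (fun y => min y x)) else o

theorem bStep_eq (ci : Int) (s : Option Int × Option Int) (x : Int) :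
    bStep ci s x = (stepL ci s.1 x, stepR ci s.2 x) := by
  obtain ⟨o1, o2⟩ := s
  simp only [bStep, stepL, stepR]
  by_cases h1 : x < ci
  · have h2 : ¬ ci < x := by omega
    cases o1 with
    | none => simp [h1, h2]
    | some y =>
      by_cases hy : x > y
      · simp [h1, h2, hy, max_eq_right (le_of_lt hy)]
      · simp [h1, h2, hy, max_eq_left (by omega : x ≤ y)]
  · by_cases h2 : ci < x
    · cases o2 with
      | none => simp [h1, h2]
      | some y =>
        by_cases hy : x < y
        · simp [h1, h2, hy, min_eq_right (le_of_lt hy)]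
        · simp [h1, h2, hy, min_eq_left (by omega : y ≤ x)]
    · simp [h1, h2]

def mergeWith (c : Int → Int → Int) (o m : Option Int) : Option Int :=
  match m with
  | none => o
  | some b => some (o.elim b (fun a => c a b))

theorem foldl_stepL (ci : Int) :
    ∀ (l : List Int) (o : Option Int),
    l.foldl (stepL ci) o = mergeWith max o (best (fun x => decide (x < ci)) max l) := by
  intro l
  induction l with
  | nil => intro o; rfl
  | cons x xs ih =>
    intro o
    rw [List.foldl_cons, ih]
    by_cases h1 : x < ci
    · simp only [stepL, best, h1, decide_true, if_true]
      cases hb : best (fun x => decide (x < ci)) max xs with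
      | none => cases o <;> simp [mergeWith]
      | some m => cases o <;> simp [mergeWith, max_assoc]
    · simp [stepL, best, h1]

theorem foldl_stepR (ci : Int) :
    ∀ (l : List Int) (o : Option Int),
    l.foldl (stepR ci) o = mergeWith min o (best (fun x => decide (ci < x)) min l) := by
  intro l
  induction l with
  | nil => intro o; rfl
  | cons x xs ih =>
    intro o
    rw [List.foldl_cons, ih]
    by_cases h1 : ci < x
    · simp only [stepR, best, h1, decide_true, if_true]
      cases hb : best (fun x => decide (ci < x)) min xs with
      | none => cases o <;> simp [mergeWith]
      | some m => cases o <;> simp [mergeWith, min_assoc]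
    · simp [stepR, best, h1]

theorem bfold_eq (ci : Int) (l : List Int) :
    l.foldl (bStep ci) (none, none) =
      (best (fun x => decide (x < ci)) max l, best (fun x => decide (ci < x)) min l) := by
  have h : ∀ (l : List Int) (s : Option Int × Option Int),
      l.foldl (bStep ci) s = (l.foldl (stepL ci) s.1, l.foldl (stepR ci) s.2) := by
    intro l
    induction l with
    | nil => intro s; rfl
    | cons x xs ih => intro s; rw [List.foldl_cons, ih, bStep_eq]; rfl
  rw [h, foldl_stepL, foldl_stepR]
  cases hb1 : best (fun x => decide (x < ci)) max l <;>
    cases hb2 : best (fun x => decide (ci < x)) min l <;> simp [mergeWith]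

-- ===== VERDICT (by name: the statement is the Claim_ definition above) =====
theorem find_rate_determining_step_py_spec : Claim_equal_find_rate_determining_step_py := by
  intro ii energies ci _
  unfold Spec_find_rate_determining_step_py find_rate_determining_step_py find_rate_determining_step_py_alt
  rw [aLoop_eq ci _ (PySem.List.sorted_pairwise ii (fun x => x)), bfold_eq]
  have hperm := PySem.List.sorted_perm ii (fun x => x) false
  rw [best_perm (fun a b => max_comm a b) (fun a b d => (max_assoc a b d).symm) hperm,
      best_perm (fun a b => min_comm a b) (fun a b d => (min_assoc a b d).symm) hperm]
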